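-- pv_equiv track=rewrite | github.com/DoktaPola/HSE | IAD/Learning Python/hw1/m2_t1.py | reverse_sentences
-- ===== SOURCE A (Python) =====
-- def reverse_sentences(text: str) -> str:  # task 1.3
--     new_text = ''
--     arr = list()
--
--     n_text = text.replace('"', '')
--     words = n_text.split()
--     for word in range(0, len(words)):
--         last_l = len(words[word]) - 1
--         if words[word][last_l:] in ['.', '?', '!', '!?', '...', '?!']:
--             arr.append(words[word][:-1])
--             for w in reversed(arr):
--                 new_text += w + ' '
--             arr = list()
--         else:
--             arr.append(words[word])
--     return new_text
-- ===== SOURCE B (Python) =====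
-- def reverse_sentences(text: str) -> str:
--     # Single BACKWARD scan over the words: sentences start (in the reversed order)
--     # at terminator words, so each collected group is already in emission order and
--     # the unterminated trailing part is skipped naturally (cur is None before the
--     # first terminator is seen).  Emission then just flattens reversed(groups).
--     words = text.replace('"', '').split()
--     groups = []
--     cur = None
--     for w in reversed(words):
--         if w[-1] in '.?!':
--             if cur is not None:
--                 groups.append(cur)
--             cur = [w[:-1]]
--         elif cur is not None:
--             cur.append(w)
--     if cur is not None:
--         groups.append(cur)
--     return ''.join(w + ' ' for g in reversed(groups) for w in g)
-- ===== Notes on version B (the rewrite author's own statement) =====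
-- stated objective: alternative
-- what changed: A scans the words forward, accumulating the current sentence and emitting it reversed each time a terminator word is reached; B scans the words once BACKWARD with an optional open group, so groups come out already in emission order (no per-sentence reversal) and the unterminated trailing words are skipped before the first terminator, then it flattens the reversed group list.
import Mathlib
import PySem

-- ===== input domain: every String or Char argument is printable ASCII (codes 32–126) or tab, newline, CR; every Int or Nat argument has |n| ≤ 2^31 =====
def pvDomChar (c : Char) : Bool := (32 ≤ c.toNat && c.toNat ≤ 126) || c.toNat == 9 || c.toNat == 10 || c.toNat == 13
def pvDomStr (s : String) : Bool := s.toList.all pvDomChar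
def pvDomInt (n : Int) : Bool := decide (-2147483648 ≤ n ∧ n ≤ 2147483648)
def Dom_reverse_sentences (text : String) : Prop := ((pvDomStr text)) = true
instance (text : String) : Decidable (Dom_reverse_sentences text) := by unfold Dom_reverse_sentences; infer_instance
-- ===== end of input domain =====

-- B replaces A's forward scan (accumulate a sentence, emit it reversed at each terminator)
-- by one backward scan whose groups are already in emission order; objective: alternative
-- decomposition (no speed claim).

-- ===== PORT A =====
-- A's loop body: state (new_text, arr); on a sentence-ending word, append word[:-1],
-- emit reversed arr into new_text (each word + ' '), and reset arr.
def pvStepA (st : String × List String) (w : String) : String × List String :=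
  let last_l : Int := (PySem.Str.len w : Int) - 1
  if PySem.Str.slice w (some last_l) none ∈ ([".", "?", "!", "!?", "...", "?!"] : List String) then
    let arr2 := st.2 ++ [PySem.Str.slice w none (some (-1))]
    (arr2.reverse.foldl (fun nt x => nt ++ x ++ " ") st.1, [])
  else
    (st.1, st.2 ++ [w])

-- n_text = text.replace('"',''); words = n_text.split(); loop 'for word in range(0, len(words))'
def reverse_sentences (text : String) : String :=
  ((PySem.List.pyRange 0 ((PySem.Str.split₀ (PySem.Str.replace text "\"" "")).length : Int) 1).foldl
      (fun st word =>
        pvStepA st (PySem.List.pyGetD (PySem.Str.split₀ (PySem.Str.replace text "\"" "")) word ""))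
      ("", [])).1

-- ===== PORT B =====
-- B's backward-scan body: state (groups, cur : Option); a terminator word closes the open
-- group (if any) and opens a fresh one holding the stripped word; a plain word extends the
-- open group; words seen before the first terminator (cur = none) are skipped.
def pvStepBwd (st : List (List String) × Option (List String)) (w : String) :
    List (List String) × Option (List String) :=
  if (PySem.Str.pyGet? w (-1)).any (fun c => c ∈ (['.', '?', '!'] : List Char)) then
    ((match st.2 with | some c => st.1 ++ [c] | none => st.1),
      some [PySem.Str.slice w none (some (-1))])
  else
    match st.2 with
    | some c => (st.1, some (c ++ [w]))
    | none => st

-- groups = groups + [cur] if cur is not None else groups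
def pvCloseGroups (st : List (List String) × Option (List String)) : List (List String) :=
  match st.2 with | some c => st.1 ++ [c] | none => st.1

-- ''.join(w + ' ' for g in reversed(groups) for w in g)
def pvFlatEmit (acc : String) (g : List String) : String :=
  g.foldl (fun a x => a ++ x ++ " ") acc

def reverse_sentences_alt (text : String) : String :=
  ((pvCloseGroups
      (((PySem.Str.split₀ (PySem.Str.replace text "\"" "")).reverse).foldl pvStepBwd
        ([], none))).reverse).foldl pvFlatEmit ""

-- ===== PRECONDITION & SPEC =====
def Spec_reverse_sentences (text : String) (out : String) : Prop := out = reverse_sentences_alt text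
instance (text : String) (out : String) : Decidable (Spec_reverse_sentences text out) := by unfold Spec_reverse_sentences; infer_instance

-- ===== CLAIM (what is proved, stated in full; the proofs are below) =====
def Claim_equal_reverse_sentences : Prop := ∀ (text : String), Dom_reverse_sentences text → Spec_reverse_sentences text (reverse_sentences text)

-- ===== LEMMAS AND PROOFS =====

-- Proof-side forward grouping spec (not a port): collect completed sentence groups in
-- forward order, keeping the open group in the second component.
def pvStepF (st : List (List String) × List String) (w : String) :
    List (List String) × List String :=
  if (PySem.Str.pyGet? w (-1)).any (fun c => c ∈ (['.', '?', '!'] : List Char)) then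
    (st.1 ++ [st.2 ++ [PySem.Str.slice w none (some (-1))]], [])
  else
    (st.1, st.2 ++ [w])

-- emission of one forward group: each word reversed-order, word + ' '
def pvEmitG (acc : String) (g : List String) : String :=
  g.reverse.foldl (fun a x => a ++ x ++ " ") acc

-- A's terminator test (the one-char tail slice against the six literals) coincides with
-- the last-character test, for every string.
lemma pvCond_eq (w : String) :
    (PySem.Str.slice w (some ((PySem.Str.len w : Int) - 1)) none
        ∈ ([".", "?", "!", "!?", "...", "?!"] : List String))
    ↔ ((PySem.Str.pyGet? w (-1)).any (fun c => c ∈ (['.', '?', '!'] : List Char)) = true) := by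
  rcases List.eq_nil_or_concat w.toList with h | ⟨l, c, h⟩
  · have hget : PySem.Str.pyGet? w (-1) = none := by
      simp [h, PySem.List.pyGet?, PySem.List.pyIdx?]
    have hsl : PySem.Str.slice w (some ((PySem.Str.len w : Int) - 1)) none = "" := by
      simp [PySem.Str.slice, h, PySem.List.slice]
    rw [hsl, hget]
    simp
  · have hget : PySem.Str.pyGet? w (-1) = some c := by simp [h]
    have hsl : PySem.Str.slice w (some ((PySem.Str.len w : Int) - 1)) none
        = String.ofList [c] := by
      simp [PySem.Str.slice, h]
    rw [hsl, hget]
    simp only [Option.any_some, decide_eq_true_eq]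
    constructor
    · intro hm
      simp only [List.mem_cons, List.not_mem_nil, or_false] at hm
      rcases hm with h1 | h1 | h1 | h1 | h1 | h1 <;>
        (have := congrArg String.toList h1
         first
         | (simp at this; subst this; decide)
         | simp at this)
    · intro hc
      simp only [List.mem_cons, List.not_mem_nil, or_false] at hc
      rcases hc with rfl | rfl | rfl <;> decide

-- The forward grouping fold only ever appends new groups: the initial group list is a prefix.
lemma pvFoldF_shift (ws : List String) (gs : List (List String)) (arr : List String) :
    ws.foldl pvStepF (gs, arr)
      = (gs ++ (ws.foldl pvStepF ([], arr)).1, (ws.foldl pvStepF ([], arr)).2) := by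
  induction ws generalizing gs arr with
  | nil => simp
  | cons w ws ih =>
    simp only [List.foldl_cons, pvStepF]
    split_ifs with h
    · simp only [List.nil_append]
      rw [ih (gs ++ [arr ++ [PySem.Str.slice w none (some (-1))]]) [],
        ih [arr ++ [PySem.Str.slice w none (some (-1))]] []]
      simp
    · exact ih gs (arr ++ [w])

-- A's interleaved fold equals emitting the forward-collected groups.
lemma pvFoldA_eq (ws : List String) (s : String) (arr : List String) :
    ws.foldl pvStepA (s, arr)
      = (((ws.foldl pvStepF ([], arr)).1).foldl pvEmitG s, (ws.foldl pvStepF ([], arr)).2) := by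
  induction ws generalizing s arr with
  | nil => simp
  | cons w ws ih =>
    simp only [List.foldl_cons]
    by_cases h : (PySem.Str.pyGet? w (-1)).any (fun c => c ∈ (['.', '?', '!'] : List Char)) = true
    · have hA : pvStepA (s, arr) w
          = (pvEmitG s (arr ++ [PySem.Str.slice w none (some (-1))]), []) := by
        simp only [pvStepA, pvEmitG]
        rw [if_pos ((pvCond_eq w).mpr h)]
      have hB : pvStepF ([], arr) w
          = ([arr ++ [PySem.Str.slice w none (some (-1))]], []) := by
        simp only [pvStepF]
        rw [if_pos h, List.nil_append]
      rw [hA, hB, ih, pvFoldF_shift ws [arr ++ [PySem.Str.slice w none (some (-1))]] []]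
      simp [pvEmitG]
    · have hA : pvStepA (s, arr) w = (s, arr ++ [w]) := by
        simp only [pvStepA]
        rw [if_neg (fun hc => h ((pvCond_eq w).mp hc))]
      have hB : pvStepF ([], arr) w = ([], arr ++ [w]) := by
        simp only [pvStepF, if_neg h]
      rw [hA, hB, ih]

-- Prefixing the open group: forward fold from ([], arr) vs ([], []).
lemma pvFoldF_arr (ws : List String) (arr : List String) :
    ws.foldl pvStepF ([], arr)
      = (match ws.foldl pvStepF ([], []) with
          | ([], c) => (([] : List (List String)), arr ++ c)
          | (g :: gs, c) => ((arr ++ g) :: gs, c)) := by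
  induction ws generalizing arr with
  | nil => simp
  | cons w ws ih =>
    simp only [List.foldl_cons, pvStepF]
    split_ifs with h
    · simp only [List.nil_append]
      rw [pvFoldF_shift ws [arr ++ [PySem.Str.slice w none (some (-1))]] [],
        pvFoldF_shift ws [[PySem.Str.slice w none (some (-1))]] []]
      simp
    · simp only [List.nil_append]
      rw [ih (arr ++ [w]), ih [w]]
      rcases hfs : ws.foldl pvStepF ([], []) with ⟨gs, c⟩
      cases gs <;> simp
  
-- Main backward/forward correspondence: the backward scan's state is the forward
-- groups with the head group (reversed) open and the rest (each reversed) in reverse order.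
lemma pvFoldBwd_eq (ws : List String) :
    ws.reverse.foldl pvStepBwd ([], none)
      = ((((ws.foldl pvStepF ([], [])).1.drop 1).map List.reverse).reverse,
          ((ws.foldl pvStepF ([], [])).1.head?).map List.reverse) := by
  induction ws with
  | nil => simp
  | cons w ws ih =>
    rw [List.reverse_cons, List.foldl_append, ih]
    simp only [List.foldl_cons, List.foldl_nil, pvStepF]
    split_ifs with h
    · simp only [List.nil_append]
      rw [pvFoldF_shift ws [[PySem.Str.slice w none (some (-1))]] []]
      simp only [pvStepBwd, if_pos h]
      rcases hfs : (ws.foldl pvStepF ([], [])).1 with _ | ⟨g, gs⟩ <;> simp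
    · simp only [pvStepBwd, if_neg h, List.nil_append]
      rw [pvFoldF_arr ws [w]]
      rcases hfs : ws.foldl pvStepF ([], []) with ⟨gs, c⟩
      cases gs <;> simp

-- ===== VERDICT (by name: the statement is the Claim_ definition above) =====
theorem reverse_sentences_spec : Claim_equal_reverse_sentences := by
  intro text _
  show reverse_sentences text = reverse_sentences_alt text
  unfold reverse_sentences reverse_sentences_alt
  rw [PySem.List.foldl_pyRange_zero_pyGetD' _ "" pvStepA ("", [])]
  rw [pvFoldA_eq, pvFoldBwd_eq]
  simp only [pvCloseGroups]
  rcases hfs : (List.foldl pvStepF ([], []) (PySem.Str.split₀ (PySem.Str.replace text "\"" ""))).1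
    with _ | ⟨g, gs⟩
  · simp
  · simp only [List.head?_cons, Option.map_some, List.drop_one, List.tail_cons,
      List.reverse_append, List.reverse_reverse, List.reverse_cons, List.reverse_nil,
      List.nil_append]
    rw [show ([g.reverse] ++ gs.map List.reverse) = (g :: gs).map List.reverse from rfl,
      List.foldl_map]
    rfl
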